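-- pv_equiv track=rewrite | github.com/cflannagan/utsushis-charm | scripts/find_pareto_dominated_charms.py | cmp_slot_multiset
-- ===== SOURCE A (Python) =====
-- def cmp_slot_multiset(
--     cand_residual: tuple[int, int, int], subj_slots: tuple[int, int, int]
-- ) -> int:
--     """
--     Rule D: both triples sorted descending (same length). Cand **wins** only if component-wise
--     cand >= subject at every index and cand > subject at at least one (strict dominance on the
--     triple). **Tie** only if the two triples are equal. Anything else (e.g. (2,0,0) vs (1,1,1)) is
--     a **loss** for the challenger on D—no E/F.
--     """
--     if cand_residual == subj_slots:
--         return 0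
--     ge = all(c >= s for c, s in zip(cand_residual, subj_slots))
--     gt = any(c > s for c, s in zip(cand_residual, subj_slots))
--     if ge and gt:
--         return 1
--     return -1
-- ===== SOURCE B (Python) =====
-- def cmp_slot_multiset(
--     cand_residual: tuple[int, int, int], subj_slots: tuple[int, int, int]
-- ) -> int:
--     # Recursive descent over the paired components with an absorbing loss:
--     # a strictly smaller component returns -1 immediately (short-circuit,
--     # no equality test and no full scans); otherwise the tail's verdict is
--     # combined with this position (a loss in the tail absorbs, a strictly
--     # greater component upgrades a tie to a win).
--     def go(pairs):
--         if not pairs: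
--             return 0
--         (c, s), rest = pairs[0], pairs[1:]
--         if c < s:
--             return -1
--         r = go(rest)
--         if r == -1:
--             return -1
--         if c > s:
--             return 1
--         return r
--     return go(list(zip(cand_residual, subj_slots)))
-- ===== Notes on version B (the rewrite author's own statement) =====
-- stated objective: alternative
-- what changed: Replaced A's three staged whole-tuple scans (equality test, all-ge scan, any-gt scan) by a single short-circuiting structural recursion over the paired components with an absorbing loss verdict: a strictly smaller component returns -1 before anything else is examined, and otherwise the tail's verdict is combined with the head's sign.
import Mathlib
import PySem

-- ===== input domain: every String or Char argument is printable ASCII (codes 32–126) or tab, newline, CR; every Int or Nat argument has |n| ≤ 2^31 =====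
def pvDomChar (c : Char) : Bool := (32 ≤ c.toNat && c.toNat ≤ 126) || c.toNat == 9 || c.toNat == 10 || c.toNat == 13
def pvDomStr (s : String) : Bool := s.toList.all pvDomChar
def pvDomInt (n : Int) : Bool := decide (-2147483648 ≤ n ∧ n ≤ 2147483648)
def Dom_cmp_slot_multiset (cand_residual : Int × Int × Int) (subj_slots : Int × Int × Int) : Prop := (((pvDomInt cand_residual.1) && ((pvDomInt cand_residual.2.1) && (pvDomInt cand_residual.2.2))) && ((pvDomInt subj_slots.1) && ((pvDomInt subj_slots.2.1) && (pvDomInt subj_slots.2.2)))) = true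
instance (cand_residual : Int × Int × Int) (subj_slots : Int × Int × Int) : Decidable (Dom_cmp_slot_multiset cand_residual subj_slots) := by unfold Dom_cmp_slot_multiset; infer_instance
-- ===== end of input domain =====

-- ===== PORT A =====
-- B replaces A's three staged whole-tuple scans by a single short-circuiting
-- recursion over the paired components with an absorbing loss; objective: alternative.
def cmp_slot_multiset (cand_residual : Int × Int × Int) (subj_slots : Int × Int × Int) : Int :=
  if cand_residual = subj_slots then 0
  else
    let pairs : List (Int × Int) :=
      [(cand_residual.1, subj_slots.1), (cand_residual.2.1, subj_slots.2.1),
       (cand_residual.2.2, subj_slots.2.2)]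
    let ge := pairs.all (fun p => p.1 ≥ p.2)
    let gt := pairs.any (fun p => p.1 > p.2)
    if ge && gt then 1 else -1

-- ===== PORT B =====
def cmp_slot_multiset_go : List (Int × Int) → Int
  | [] => 0
  | (c, s) :: rest =>
    if c < s then -1
    else
      let r := cmp_slot_multiset_go rest
      if r = -1 then -1
      else if c > s then 1
      else r

def cmp_slot_multiset_alt (cand_residual : Int × Int × Int) (subj_slots : Int × Int × Int) : Int :=
  cmp_slot_multiset_go
    [(cand_residual.1, subj_slots.1), (cand_residual.2.1, subj_slots.2.1),
     (cand_residual.2.2, subj_slots.2.2)]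

-- ===== PRECONDITION & SPEC =====
def Spec_cmp_slot_multiset (cand_residual : Int × Int × Int) (subj_slots : Int × Int × Int) (out : Int) : Prop := out = cmp_slot_multiset_alt cand_residual subj_slots
instance (cand_residual : Int × Int × Int) (subj_slots : Int × Int × Int) (out : Int) : Decidable (Spec_cmp_slot_multiset cand_residual subj_slots out) := by unfold Spec_cmp_slot_multiset; infer_instance

-- ===== CLAIM =====
def Claim_equal_cmp_slot_multiset : Prop := ∀ (cand_residual : Int × Int × Int) (subj_slots : Int × Int × Int), Dom_cmp_slot_multiset cand_residual subj_slots → Spec_cmp_slot_multiset cand_residual subj_slots (cmp_slot_multiset cand_residual subj_slots)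

-- ===== LEMMAS AND PROOFS =====

set_option maxHeartbeats 800000 in
lemma cmp_slot_multiset_go_spec (l : List (Int × Int)) :
    cmp_slot_multiset_go l =
      if l.any (fun p => p.1 < p.2) then -1
      else if l.any (fun p => p.2 < p.1) then 1 else 0 := by
  induction l with
  | nil => simp [cmp_slot_multiset_go]
  | cons p rest ih =>
    obtain ⟨c, s⟩ := p
    by_cases hn : c < s <;>
    by_cases hA : (rest.any (fun p => p.1 < p.2)) = true <;>
    by_cases hB : (rest.any (fun p => p.2 < p.1)) = true <;>
    by_cases hp : c > s <;>
      simp [cmp_slot_multiset_go, ih, hn, hA, hB, hp]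

-- ===== VERDICT =====
set_option maxHeartbeats 800000 in
theorem cmp_slot_multiset_spec : Claim_equal_cmp_slot_multiset := by
  intro ⟨c1, c2, c3⟩ ⟨s1, s2, s3⟩ _
  unfold Spec_cmp_slot_multiset cmp_slot_multiset cmp_slot_multiset_alt
  rw [cmp_slot_multiset_go_spec]
  simp only [List.all_cons, List.all_nil, List.any_cons, List.any_nil,
    Bool.and_eq_true, Bool.or_eq_true, decide_eq_true_eq, Prod.mk.injEq,
    Bool.and_true, Bool.or_false, ge_iff_le, gt_iff_lt]
  split_ifs <;> omega
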